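-- pv_equiv track=rewrite | github.com/talhajunaidd/pyrthomas | pyrthomas/network_analyser.py | calculate_next_states
-- ===== SOURCE A (Python) =====
-- def calculate_next_states(k_states):
--     for state_key, state in k_states.items():
--         previous_entities = dict(state_key)
--         new_val = list()
--         temp_previous = previous_entities.copy()
--         for entity_key, previous_entity in previous_entities.items():
--             next_value = k_states[state_key][entity_key]
--
--             if next_value > previous_entity:
--                 previous_entities[entity_key] = previous_entity + 1
--             elif next_value < previous_entity:
--                 previous_entities[entity_key] = previous_entity - 1
--
--             if not (previous_entities in new_val) and not previous_entities == temp_previous: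
--                 new_val.append(previous_entities.copy())
--                 previous_entities[entity_key] = temp_previous[entity_key]
--         k_states[state_key] = new_val
--     return k_states
-- ===== SOURCE B (Python) =====
-- def _neighbours(state, done, rest):
--     if not rest:
--         return []
--     (k, v), tail = rest[0], rest[1:]
--     t = state[k]
--     here = [] if t == v else [dict(done + [(k, v + (1 if t > v else -1))] + tail)]
--     return here + _neighbours(state, done + [(k, v)], tail)
--
--
-- def calculate_next_states(k_states):
--     for state_key, state in k_states.items():
--         k_states[state_key] = _neighbours(state, [], list(dict(state_key).items()))
--     return k_states
-- ===== Notes on version B (the rewrite author's own statement) =====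
-- stated objective: alternative
-- what changed: B replaces A's mutate-then-revert of one shared dict plus a membership scan of new_val with a recursive zipper over the state's item list: each neighbour is assembled independently from the already-visited prefix, the single bumped pair, and the untouched suffix, so no dict is ever mutated or reverted and no dedup check exists.
import Mathlib
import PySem

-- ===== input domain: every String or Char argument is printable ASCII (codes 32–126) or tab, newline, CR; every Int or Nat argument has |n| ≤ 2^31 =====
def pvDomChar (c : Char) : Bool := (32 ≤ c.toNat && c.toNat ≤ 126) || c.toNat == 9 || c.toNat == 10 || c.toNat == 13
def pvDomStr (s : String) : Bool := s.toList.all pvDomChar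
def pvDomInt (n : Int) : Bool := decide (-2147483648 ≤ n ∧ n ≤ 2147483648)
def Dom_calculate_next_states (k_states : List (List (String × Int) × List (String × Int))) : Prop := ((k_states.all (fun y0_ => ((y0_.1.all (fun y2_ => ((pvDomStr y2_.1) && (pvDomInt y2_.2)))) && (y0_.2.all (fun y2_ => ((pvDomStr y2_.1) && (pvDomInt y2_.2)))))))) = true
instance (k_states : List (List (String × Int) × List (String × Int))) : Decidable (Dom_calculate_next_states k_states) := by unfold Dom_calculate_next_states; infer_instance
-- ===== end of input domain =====

-- B replaces A's mutate/revert of a shared dict and its `new_val` membership scan with a recursive zipper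
-- over the item list, splicing each neighbour from prefix ++ bumped pair ++ suffix; both Pythons mutate
-- `k_states` in place identically, the claim is about the return value.

-- ===== PORT A =====
-- next_value = k_states[state_key][entity_key] : first-match lookup of the tuple key, then dict lookup;
-- the .getD fallbacks are reached only on inputs Pre_ excludes (KeyError in Python).
def pyNextA (ks : List (List (String × Int) × List (String × Int))) (sk : List (String × Int)) (ek : String) : Int :=
  ((PySem.Dict.ofList ((List.lookup sk ks).getD [])).get? ek).getD 0

-- one iteration of A's inner loop; state = (previous_entities, new_val).
-- `previous_entities in new_val` / `== temp_previous`: Python's dict == ignores key order, but every dict here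
-- carries temp's key order unchanged (insert overwrites in place), so Dict equality (items equality) is exact.
def stepA (ks : List (List (String × Int) × List (String × Int))) (sk : List (String × Int))
    (temp : PySem.Dict String Int)
    (acc : PySem.Dict String Int × List (PySem.Dict String Int)) (p : String × Int) :
    PySem.Dict String Int × List (PySem.Dict String Int) :=
  let prev := acc.1
  let new_val := acc.2
  let next := pyNextA ks sk p.1
  let prev1 :=
    if next > p.2 then prev.insert p.1 (p.2 + 1)
    else if next < p.2 then prev.insert p.1 (p.2 - 1)
    else prev
  if (¬ ∃ d ∈ new_val, d = prev1) ∧ prev1 ≠ temp then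
    (prev1.insert p.1 ((temp.get? p.1).getD 0), new_val ++ [prev1])   -- append copy, then revert
  else (prev1, new_val)

-- A mutates values only, never keys, and always reverts previous_entities before the next iteration,
-- so iterating previous_entities.items() reads exactly temp's items.
def calculate_next_states (k_states : List (List (String × Int) × List (String × Int))) : List (List (String × Int) × List (List (String × Int))) :=
  k_states.map (fun e =>
    let temp := PySem.Dict.ofList e.1        -- previous_entities = dict(state_key); temp_previous = its copy
    let r := temp.items.foldl (stepA k_states e.1 temp) (temp, [])
    (e.1, r.2.map PySem.Dict.items))

-- ===== PORT B =====
-- _neighbours(state, done, rest): recursive zipper over the item list;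
-- dict(done + [(k, v±1)] + tail) → (PySem.Dict.ofList …).items.
def nbAux (st : PySem.Dict String Int) (done : List (String × Int)) :
    List (String × Int) → List (List (String × Int))
  | [] => []
  | (k, v) :: tail =>
    let t := st.getD k 0                     -- state[k]; the default is reached only outside Pre_
    let here := if t = v then ([] : List (List (String × Int)))
      else [(PySem.Dict.ofList (done ++ [(k, v + (if t > v then 1 else -1))] ++ tail)).items]
    here ++ nbAux st (done ++ [(k, v)]) tail

def calculate_next_states_alt (k_states : List (List (String × Int) × List (String × Int))) : List (List (String × Int) × List (List (String × Int))) :=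
  k_states.map (fun e =>
    (e.1, nbAux (PySem.Dict.ofList e.2) [] (PySem.Dict.ofList e.1).items))

-- ===== PRECONDITION & SPEC =====
-- Pre_ excludes (i) association lists with duplicate outer keys, which do not represent a Python dict
-- (the argument is a dict keyed by tuples, so its keys are unique), and (ii) inputs where some entity key of a
-- state tuple is missing from that state's value dict, on which A raises KeyError (and B raises KeyError too).
def Pre_calculate_next_states (k_states : List (List (String × Int) × List (String × Int))) : Prop :=
  (k_states.map Prod.fst).Nodup ∧
  ∀ e ∈ k_states, ∀ p ∈ (PySem.Dict.ofList e.1).items, (PySem.Dict.ofList e.2).contains p.1 = true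
instance (k_states : List (List (String × Int) × List (String × Int))) : Decidable (Pre_calculate_next_states k_states) := by unfold Pre_calculate_next_states; infer_instance

def pvWitness_calculate_next_states : (List (List (String × Int) × List (String × Int))) :=
  [([("a", 0), ("b", 1)], [("a", 1), ("b", 1)]), ([("a", 1)], [("a", 0)])]

def Spec_calculate_next_states (k_states : List (List (String × Int) × List (String × Int))) (out : List (List (String × Int) × List (List (String × Int)))) : Prop := out = calculate_next_states_alt k_states
instance (k_states : List (List (String × Int) × List (String × Int))) (out : List (List (String × Int) × List (List (String × Int)))) : Decidable (Spec_calculate_next_states k_states out) := by unfold Spec_calculate_next_states; infer_instance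

-- ===== CLAIM (what is proved, stated in full; the proofs are below) =====
def Claim_equal_calculate_next_states : Prop := ∀ (k_states : List (List (String × Int) × List (String × Int))), Dom_calculate_next_states k_states → Pre_calculate_next_states k_states → Spec_calculate_next_states k_states (calculate_next_states k_states)

-- ===== LEMMAS AND PROOFS =====

theorem lookup_of_mem_nodup (ks : List (List (String × Int) × List (String × Int)))
    (e : List (String × Int) × List (String × Int))
    (hnd : (ks.map Prod.fst).Nodup) (he : e ∈ ks) : List.lookup e.1 ks = some e.2 := by
  induction ks with
  | nil => simp at he
  | cons a t ih =>
    simp only [List.map_cons, List.nodup_cons] at hnd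
    rcases List.mem_cons.mp he with h | h
    · subst h; simp [List.lookup]
    · have hne : e.1 ≠ a.1 := by
        intro hEq
        exact hnd.1 (hEq ▸ List.mem_map_of_mem h)
      have hb : (e.1 == a.1) = false := beq_eq_false_iff_ne.mpr hne
      simp only [List.lookup, hb]
      exact ih hnd.2 h

-- dict(l) for a list with pairwise-distinct keys has items l
theorem dict_ofList_items_of_nodup (l : List (String × Int))
    (hnd : (l.map Prod.fst).Nodup) : (PySem.Dict.ofList l : PySem.Dict String Int).items = l := by
  have h := PySem.Dict.items_foldl_insert_fresh (l := l) (k := Prod.fst) (v := Prod.snd)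
      (d := (PySem.Dict.empty : PySem.Dict String Int))
      (by intro a _; exact PySem.Dict.contains_empty _) hnd
  simpa [PySem.Dict.ofList] using h

theorem map_keyfix (l : List (String × Int)) (k : String) (w : Int)
    (h : k ∉ l.map Prod.fst) :
    l.map (fun q => if q.1 == k then (k, w) else q) = l := by
  induction l with
  | nil => rfl
  | cons a t ih =>
    simp only [List.map_cons, List.mem_cons, not_or] at h
    simp only [List.map_cons]
    rw [ih h.2]
    have : (a.1 == k) = false := beq_eq_false_iff_ne.mpr (fun hEq => h.1 hEq.symm)
    simp [this]

theorem dict_insert_eq_self (d : PySem.Dict String Int) (k : String) (v : Int)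
    (hnd : d.keys.Nodup) (h : d.get? k = some v) : d.insert k v = d := by
  have hc : d.contains k = true := by
    rw [PySem.Dict.contains_eq_isSome_get?, h]; rfl
  apply PySem.Dict.ext
  rw [PySem.Dict.items_insert_of_contains d v hc]
  conv_rhs => rw [← List.map_id d.items]
  apply List.map_congr_left
  intro p hp
  by_cases hk : p.1 = k
  · have h2 : d.get? p.1 = some p.2 :=
      PySem.Dict.get?_of_mem_items d (show (p.1, p.2) ∈ d.items from by simpa using hp) hnd
    rw [hk, h] at h2
    have hv : v = p.2 := (Option.some.injEq _ _).mp h2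
    simp only [hk, beq_self_eq_true, if_true, id]
    rw [hv, ← hk]
  · simp [hk]

theorem inner_loop (ks : List (List (String × Int) × List (String × Int)))
    (sk : List (String × Int)) (st : List (String × Int))
    (hlk : List.lookup sk ks = some st)
    (temp : PySem.Dict String Int)
    (done l : List (String × Int)) (accA : List (PySem.Dict String Int)) (accB : List (List (String × Int)))
    (hitems : temp.items = done ++ l)
    (htnd : temp.keys.Nodup)
    (hAB : accA.map PySem.Dict.items = accB)
    (hacc : ∀ d ∈ accA, ∀ p ∈ l, d.get? p.1 = temp.get? p.1) :
    (l.foldl (stepA ks sk temp) (temp, accA)).1 = temp ∧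
    (l.foldl (stepA ks sk temp) (temp, accA)).2.map PySem.Dict.items =
      accB ++ nbAux (PySem.Dict.ofList st) done l := by
  induction l generalizing done accA accB with
  | nil => exact ⟨rfl, by simp [nbAux, hAB]⟩
  | cons p rest ih =>
    obtain ⟨k, v⟩ := p
    have hknd : ((done ++ (k, v) :: rest).map Prod.fst).Nodup := by
      have h := htnd
      simp only [PySem.Dict.keys, hitems] at h
      exact h
    rw [List.map_append] at hknd
    have hdisj := hknd
    rw [List.nodup_append] at hdisj
    have hkdone : k ∉ done.map Prod.fst := fun h => hdisj.2.2 k h k (by simp) rfl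
    have hkrest : k ∉ rest.map Prod.fst := by
      have := hdisj.2.1
      simp only [List.map_cons, List.nodup_cons] at this
      exact this.1
    have hcur : temp.get? k = some v :=
      PySem.Dict.get?_of_mem_items temp (by rw [hitems]; simp) htnd
    have hnext : pyNextA ks sk k = (PySem.Dict.ofList st).getD k 0 := by
      simp [pyNextA, hlk, PySem.Dict.getD_eq_get?_getD]
    set nxt := ((PySem.Dict.ofList st : PySem.Dict String Int)).getD k 0 with hn
    clear_value nxt
    simp only [List.foldl_cons]
    by_cases hne : nxt = v
    · -- next == cur : A does nothing, B emits nothing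
      have hstep : stepA ks sk temp (temp, accA) (k, v) = (temp, accA) := by
        have hng : ¬ (nxt > v) := by omega
        have hnl : ¬ (nxt < v) := by omega
        simp only [stepA, hnext]
        rw [if_neg hng, if_neg hnl, if_neg]
        rintro ⟨-, h2⟩
        exact h2 rfl
      rw [hstep]
      have hres := ih (done ++ [(k, v)]) accA accB
        (by rw [hitems]; simp) hAB
        (fun d hd q hq => hacc d hd q (List.mem_cons_of_mem _ hq))
      refine hres.imp id ?_
      intro h
      rw [h]
      simp only [nbAux, ← hn, if_pos hne, List.nil_append]
    · -- next ≠ cur : A appends temp.insert k w then reverts; B splices done ++ [(k,w)] ++ rest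
      have hval : v + (if nxt > v then (1 : Int) else -1)
          = if nxt > v then v + 1 else v - 1 := by
        by_cases hg : nxt > v
        · rw [if_pos hg, if_pos hg]
        · rw [if_neg hg, if_neg hg]; ring
      set w : Int := if nxt > v then v + 1 else v - 1 with hw
      have hwne : w ≠ v := by
        rw [hw]; by_cases hg : nxt > v
        · rw [if_pos hg]; omega
        · rw [if_neg hg]; omega
      have hprev1 : (if pyNextA ks sk k > v then temp.insert k (v + 1)
          else if pyNextA ks sk k < v then temp.insert k (v - 1) else temp)
          = temp.insert k w := by
        rw [hnext, hw]
        by_cases hg : nxt > v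
        · rw [if_pos hg, if_pos hg]
        · rw [if_neg hg, if_pos (by omega), if_neg hg]
      have hstep : stepA ks sk temp (temp, accA) (k, v) =
          (temp, accA ++ [temp.insert k w]) := by
        simp only [stepA]
        rw [hprev1, if_pos]
        · rw [hcur]
          show ((temp.insert k w).insert k v, _) = _
          rw [PySem.Dict.insert_insert_self, dict_insert_eq_self temp k v htnd hcur]
        · constructor
          · rintro ⟨d, hd, rfl⟩
            have := hacc _ hd (k, v) (List.mem_cons_self ..)
            rw [hcur, PySem.Dict.get?_insert_self] at this
            exact hwne (Option.some.injEq _ _ |>.mp this)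
          · intro hEq
            have := congrArg (fun d => PySem.Dict.get? d k) hEq
            simp only [PySem.Dict.get?_insert_self, hcur] at this
            exact hwne (Option.some.injEq _ _ |>.mp this)
      rw [hstep]
      have hitemsw : (temp.insert k w).items = done ++ (k, w) :: rest := by
        rw [PySem.Dict.items_insert_of_contains _ w
          (by rw [PySem.Dict.contains_eq_isSome_get?, hcur]; rfl), hitems]
        simp only [List.map_append, List.map_cons]
        rw [map_keyfix done k w hkdone, map_keyfix rest k w hkrest]
        simp
      have hofl : (PySem.Dict.ofList (done ++ (k, w) :: rest) : PySem.Dict String Int).items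
          = done ++ (k, w) :: rest := by
        apply dict_ofList_items_of_nodup
        simpa using hknd
      have hres := ih (done ++ [(k, v)]) (accA ++ [temp.insert k w])
        (accB ++ [done ++ (k, w) :: rest])
        (by rw [hitems]; simp)
        (by rw [List.map_append, hAB, List.map_singleton, hitemsw])
        ?_
      · refine hres.imp id ?_
        intro h
        rw [h]
        simp only [nbAux, ← hn, if_neg hne, hval, hofl, List.append_assoc,
          List.cons_append, List.nil_append]
      · intro d hd q hq
        rcases List.mem_append.mp hd with hd | hd
        · exact hacc d hd q (List.mem_cons_of_mem _ hq)
        · simp only [List.mem_singleton] at hd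
          subst hd
          apply PySem.Dict.get?_insert_of_ne
          intro hEq
          exact hkrest (hEq ▸ List.mem_map_of_mem hq)

-- ===== VERDICT (by name: the statement is the Claim_ definition above) =====
theorem calculate_next_states_spec : Claim_equal_calculate_next_states := by
  intro ks _hdom hpre
  unfold Spec_calculate_next_states
  unfold calculate_next_states calculate_next_states_alt
  apply List.map_congr_left
  intro e he
  have hlk : List.lookup e.1 ks = some e.2 := lookup_of_mem_nodup ks e hpre.1 he
  have htnd : (PySem.Dict.ofList e.1 : PySem.Dict String Int).keys.Nodup :=
    PySem.Dict.nodup_keys_ofList e.1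
  have h := inner_loop ks e.1 e.2 hlk (PySem.Dict.ofList e.1)
    [] (PySem.Dict.ofList e.1).items [] [] rfl htnd rfl (by simp)
  simp only [h.2, List.nil_append]
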